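-- pv_equiv track=rewrite | github.com/anitaandonato/Atividades | quest2.py | afd_par_de_zeros
-- ===== SOURCE A (Python) =====
-- def afd_par_de_zeros(string):
--     estado = 'q0'
--     for simbolo in string:
--         if estado == 'q0':
--             if simbolo == '0':
--                 estado = 'q1'
--         elif estado == 'q1':
--             if simbolo == '0':
--                 estado = 'q0'
--     return estado == 'q0'
-- ===== SOURCE B (Python) =====
-- def afd_par_de_zeros(string):
--     return sum(1 for c in string if c == '0') % 2 == 0
-- ===== Notes on version B (the rewrite author's own statement) =====
-- stated objective: simpler
-- what changed: Replaces the two-state DFA with explicit state transitions by a single counting pass and a closed-form parity test on the number of zero characters in the input.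
import Mathlib
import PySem

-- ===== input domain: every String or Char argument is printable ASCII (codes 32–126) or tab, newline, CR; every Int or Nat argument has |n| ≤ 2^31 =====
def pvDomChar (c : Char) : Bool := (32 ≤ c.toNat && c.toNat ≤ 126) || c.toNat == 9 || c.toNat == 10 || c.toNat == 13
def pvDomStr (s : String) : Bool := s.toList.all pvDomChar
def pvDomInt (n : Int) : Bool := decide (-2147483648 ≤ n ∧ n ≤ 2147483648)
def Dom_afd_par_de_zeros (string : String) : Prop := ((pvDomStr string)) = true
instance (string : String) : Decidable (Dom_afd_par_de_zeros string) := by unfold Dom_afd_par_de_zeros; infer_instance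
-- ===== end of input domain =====

-- B replaces the explicit two-state DFA by one counting pass and a parity test (simpler decomposition).

-- ===== PORT A =====
-- literal port: fold over the characters, carrying the DFA state as a String
def afd_par_de_zeros (string : String) : Bool :=
  let estado := string.toList.foldl (fun estado simbolo =>
    if estado == "q0" then
      (if simbolo == '0' then "q1" else estado)
    else if estado == "q1" then
      (if simbolo == '0' then "q0" else estado)
    else estado) "q0"
  estado == "q0"

-- ===== PORT B =====
-- port of Source B: sum 1 for each '0', then test the total's parity
def afd_par_de_zeros_alt (string : String) : Bool :=
  (string.toList.foldl (fun acc c => if c == '0' then acc + 1 else acc) (0 : Int)) % 2 == 0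

-- ===== PRECONDITION & SPEC =====
def Spec_afd_par_de_zeros (string : String) (out : Bool) : Prop := out = afd_par_de_zeros_alt string
instance (string : String) (out : Bool) : Decidable (Spec_afd_par_de_zeros string out) := by unfold Spec_afd_par_de_zeros; infer_instance

-- ===== CLAIM (what is proved, stated in full; the proofs are below) =====
def Claim_equal_afd_par_de_zeros : Prop := ∀ (string : String), Dom_afd_par_de_zeros string → Spec_afd_par_de_zeros string (afd_par_de_zeros string)

-- ===== LEMMAS AND PROOFS =====

-- loop invariant: the DFA state is "q0" iff the running zero-count is even, "q1" iff odd
theorem afd_loops_agree (l : List Char) (st : String) (n : Int)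
    (h : (st = "q0" ∧ n % 2 = 0) ∨ (st = "q1" ∧ n % 2 = 1)) :
    ((l.foldl (fun estado simbolo =>
      if estado == "q0" then
        (if simbolo == '0' then "q1" else estado)
      else if estado == "q1" then
        (if simbolo == '0' then "q0" else estado)
      else estado) st) == "q0")
    = ((l.foldl (fun acc c => if c == '0' then acc + 1 else acc) n) % 2 == 0) := by
  induction l generalizing st n with
  | nil =>
    rcases h with ⟨hs, hn⟩ | ⟨hs, hn⟩ <;> subst hs <;> simp [List.foldl, hn]
  | cons c l ih =>
    simp only [List.foldl]
    by_cases hc : c = '0'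
    · subst hc
      rcases h with ⟨hs, hn⟩ | ⟨hs, hn⟩ <;> subst hs
      · simp only [beq_self_eq_true, if_true]
        exact ih _ _ (Or.inr ⟨rfl, by omega⟩)
      · have h1 : ("q1" == "q0") = false := by decide
        simp only [h1, beq_self_eq_true, if_true, Bool.false_eq_true, if_false]
        exact ih _ _ (Or.inl ⟨rfl, by omega⟩)
    · have hcb : (c == '0') = false := by simpa using hc
      rcases h with ⟨hs, hn⟩ | ⟨hs, hn⟩ <;> subst hs
      · simp only [hcb, beq_self_eq_true, if_true, Bool.false_eq_true, if_false]
        exact ih _ _ (Or.inl ⟨rfl, hn⟩)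
      · have : ("q1" == "q0") = false := by decide
        simp only [hcb, this, beq_self_eq_true, if_true, Bool.false_eq_true, if_false]
        exact ih _ _ (Or.inr ⟨rfl, hn⟩)

-- ===== VERDICT (by name: the statement is the Claim_ definition above) =====
theorem afd_par_de_zeros_spec : Claim_equal_afd_par_de_zeros := by
  intro s _
  unfold Spec_afd_par_de_zeros afd_par_de_zeros afd_par_de_zeros_alt
  exact afd_loops_agree s.toList "q0" 0 (Or.inl ⟨rfl, rfl⟩)
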